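-- pv_equiv track=rewrite | github.com/cmsjade5000/ORION | scripts/delegated_job_state.py | infer_workflow_state
-- ===== SOURCE A (Python) =====
-- def infer_workflow_state(states: list[str]) -> str:
--     normalized = [str(state or "").strip() for state in states if str(state or "").strip()]
--     if not normalized:
--         return "queued"
--     if any(state in {"blocked", "manual_required", "unsupported"} for state in normalized):
--         return "blocked"
--     if all(state == "complete" for state in normalized):
--         return "complete"
--     if any(state in {"in_progress", "pending_verification"} for state in normalized):
--         return "in_progress"
--     return "queued"
-- ===== SOURCE B (Python) =====
-- def infer_workflow_state(states: list[str]) -> str: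
--     seen = False
--     has_blocked = False
--     all_complete = True
--     has_in_progress = False
--     for raw in states:
--         s = str(raw or "").strip()
--         if not s:
--             continue
--         seen = True
--         if s in ("blocked", "manual_required", "unsupported"):
--             has_blocked = True
--         if s != "complete":
--             all_complete = False
--         if s in ("in_progress", "pending_verification"):
--             has_in_progress = True
--     if not seen:
--         return "queued"
--     if has_blocked:
--         return "blocked"
--     if all_complete:
--         return "complete"
--     if has_in_progress:
--         return "in_progress"
--     return "queued"
-- ===== Notes on version B (the rewrite author's own statement) =====
-- stated objective: alternative
-- what changed: Replaces the intermediate normalized list and the three separate any/all scans with one single pass over the raw input that normalizes inline and accumulates four boolean flags, deciding the priority ladder once at the end.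
import Mathlib
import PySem

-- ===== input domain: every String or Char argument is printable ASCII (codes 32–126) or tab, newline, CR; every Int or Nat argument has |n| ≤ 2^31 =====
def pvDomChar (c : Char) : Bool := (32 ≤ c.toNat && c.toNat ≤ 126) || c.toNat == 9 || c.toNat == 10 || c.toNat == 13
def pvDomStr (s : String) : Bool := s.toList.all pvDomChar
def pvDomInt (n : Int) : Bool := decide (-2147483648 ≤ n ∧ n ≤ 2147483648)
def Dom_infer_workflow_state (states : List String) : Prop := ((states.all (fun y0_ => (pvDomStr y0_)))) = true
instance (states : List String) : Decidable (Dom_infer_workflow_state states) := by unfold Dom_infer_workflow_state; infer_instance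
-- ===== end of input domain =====

-- B replaces A's normalized list plus three any/all scans by one inline-normalizing pass with four boolean flags (alternative decomposition, same cost).

-- ===== PORT A =====
def infer_workflow_state (states : List String) : String :=
  let normalized := (states.map (fun s => PySem.Str.strip s)).filter (fun t => t ≠ "")
  if normalized.isEmpty then "queued"
  else if normalized.any (fun s => s == "blocked" || s == "manual_required" || s == "unsupported") then "blocked"
  else if normalized.all (fun s => s == "complete") then "complete"
  else if normalized.any (fun s => s == "in_progress" || s == "pending_verification") then "in_progress"
  else "queued"

-- ===== PORT B =====
def infer_workflow_state_alt (states : List String) : String :=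
  let r := states.foldl (fun (acc : Bool × Bool × Bool × Bool) raw =>
      let s := PySem.Str.strip raw
      if s = "" then acc
      else (true,
            acc.2.1 || (s == "blocked" || s == "manual_required" || s == "unsupported"),
            acc.2.2.1 && (s == "complete"),
            acc.2.2.2 || (s == "in_progress" || s == "pending_verification")))
    (false, false, true, false)
  if !r.1 then "queued"
  else if r.2.1 then "blocked"
  else if r.2.2.1 then "complete"
  else if r.2.2.2 then "in_progress"
  else "queued"

-- ===== PRECONDITION & SPEC =====
def Spec_infer_workflow_state (states : List String) (out : String) : Prop := out = infer_workflow_state_alt states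
instance (states : List String) (out : String) : Decidable (Spec_infer_workflow_state states out) := by unfold Spec_infer_workflow_state; infer_instance

-- ===== CLAIM (what is proved, stated in full; the proofs are below) =====
def Claim_equal_infer_workflow_state : Prop := ∀ (states : List String), Dom_infer_workflow_state states → Spec_infer_workflow_state states (infer_workflow_state states)

-- ===== LEMMAS AND PROOFS =====

-- the fold computes (seen, any-blocked, all-complete, any-in-progress) over the normalized sublist
theorem iws_fold_char (states : List String) (a b c d : Bool) :
    states.foldl (fun (acc : Bool × Bool × Bool × Bool) raw =>
      let s := PySem.Str.strip raw
      if s = "" then acc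
      else (true,
            acc.2.1 || (s == "blocked" || s == "manual_required" || s == "unsupported"),
            acc.2.2.1 && (s == "complete"),
            acc.2.2.2 || (s == "in_progress" || s == "pending_verification")))
      (a, b, c, d)
    = (let n := (states.map (fun s => PySem.Str.strip s)).filter (fun t => t ≠ "")
       (a || !n.isEmpty,
        b || n.any (fun s => s == "blocked" || s == "manual_required" || s == "unsupported"),
        c && n.all (fun s => s == "complete"),
        d || n.any (fun s => s == "in_progress" || s == "pending_verification"))) := by
  induction states generalizing a b c d with
  | nil => simp
  | cons x xs ih =>
    simp only [List.foldl_cons, List.map_cons]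
    by_cases h : PySem.Str.strip x = ""
    · simp [h, ih]
    · rw [ih]
      simp [h, Bool.or_assoc, Bool.and_assoc]

-- ===== VERDICT (by name: the statement is the Claim_ definition above) =====
theorem infer_workflow_state_spec : Claim_equal_infer_workflow_state := by
  intro states _
  unfold Spec_infer_workflow_state infer_workflow_state infer_workflow_state_alt
  rw [iws_fold_char]
  simp only [Bool.false_or, Bool.true_and]
  simp
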